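-- pv_equiv track=rewrite | github.com/this-guy-git/guython-vscode | interpreter/guython/core/interpreter.py | _tokenize_print_args
-- ===== SOURCE A (Python) =====
-- from typing import Dict, List, Tuple, Any, Optional
--
-- def _tokenize_print_args(args_str: str) -> List[str]:
--     """Tokenize print arguments"""
--     tokens = []
--     current = ''
--     in_single = False
--     in_double = False
--     i = 0
--
--     while i < len(args_str):
--         c = args_str[i]
--
--         if c == "'" and not in_double:
--             if in_single:
--                 current += c
--                 tokens.append(current)
--                 current = ''
--                 in_single = False
--             else:
--                 if current:
--                     tokens.append(current)
--                     current = ''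
--                 current = c
--                 in_single = True
--
--         elif c == '"' and not in_single:
--             if in_double:
--                 current += c
--                 tokens.append(current)
--                 current = ''
--                 in_double = False
--             else:
--                 if current:
--                     tokens.append(current)
--                     current = ''
--                 current = c
--                 in_double = True
--
--         elif c == ' ' and not in_single and not in_double:
--             if current:
--                 tokens.append(current)
--                 current = ''
--
--         else:
--             current += c
--
--         i += 1
--
--     if current:
--         tokens.append(current)
--
--     return tokens
-- ===== SOURCE B (Python) =====
-- def _tokenize_print_args(args_str: str) -> list:
--     """Tokenize print arguments (chunk scanner: jump quote-to-quote / run-to-run)."""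
--     tokens = []
--     i = 0
--     n = len(args_str)
--     while i < n:
--         c = args_str[i]
--         if c == ' ':
--             i += 1
--         elif c == "'" or c == '"':
--             j = args_str.find(c, i + 1)
--             if j == -1:
--                 tokens.append(args_str[i:])
--                 i = n
--             else:
--                 tokens.append(args_str[i:j + 1])
--                 i = j + 1
--         else:
--             j = i
--             while j < n and args_str[j] not in " '\"":
--                 j += 1
--             tokens.append(args_str[i:j])
--             i = j
--     return tokens
-- ===== Notes on version B (the rewrite author's own statement) =====
-- stated objective: faster
-- what changed: Replaced A's char-by-char state machine (current buffer plus in_single/in_double flags, one Python-level iteration and string concatenation per character) with a chunk scanner that at each token start jumps directly: skip a space, str.find the matching quote and slice out the whole quoted token at once (rest of string if unterminated), or slice out a maximal run of non-space non-quote characters.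
import Mathlib
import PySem

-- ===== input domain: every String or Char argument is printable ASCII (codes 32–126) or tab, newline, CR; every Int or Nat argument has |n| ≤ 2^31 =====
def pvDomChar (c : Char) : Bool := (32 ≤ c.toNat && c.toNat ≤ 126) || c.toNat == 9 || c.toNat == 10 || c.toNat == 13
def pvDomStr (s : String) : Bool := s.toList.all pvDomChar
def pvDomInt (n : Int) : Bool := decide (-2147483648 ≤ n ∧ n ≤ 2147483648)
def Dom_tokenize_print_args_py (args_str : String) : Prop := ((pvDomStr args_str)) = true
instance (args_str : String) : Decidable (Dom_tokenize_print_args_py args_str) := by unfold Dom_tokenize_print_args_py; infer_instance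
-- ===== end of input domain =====

-- B replaces A's char-by-char quote state machine by a chunk scanner that jumps
-- from token start to token end (quote-to-quote / run-to-run); objective: alternative.


-- ===== PORT A =====
-- literal port of A's while loop: state (tokens, current, in_single, in_double), one char per step;
-- the base case performs the final `if current: tokens.append(current)` flush.
def pvLoopA (tokens : List (List Char)) (cur : List Char) (in_single in_double : Bool) :
    List Char → List (List Char)
  | [] => if cur = [] then tokens else tokens ++ [cur]
  | c :: rest =>
    if c == '\'' && !in_double then
      if in_single then
        pvLoopA (tokens ++ [cur ++ [c]]) [] false in_double rest
      else
        pvLoopA (if cur = [] then tokens else tokens ++ [cur]) [c] true in_double rest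
    else if c == '"' && !in_single then
      if in_double then
        pvLoopA (tokens ++ [cur ++ [c]]) [] in_single false rest
      else
        pvLoopA (if cur = [] then tokens else tokens ++ [cur]) [c] in_single true rest
    else if c == ' ' && !in_single && !in_double then
      pvLoopA (if cur = [] then tokens else tokens ++ [cur]) [] in_single in_double rest
    else
      pvLoopA tokens (cur ++ [c]) in_single in_double rest

def tokenize_print_args_py (args_str : String) : List String :=
  (pvLoopA [] [] false false args_str.toList).map String.mk

-- ===== PORT B =====
-- chunk scanner (Source B): skip a space, or take a whole quoted token by searching the
-- matching quote (unterminated quote takes the rest), or take a maximal run of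
-- non-space non-quote characters.
def pvOther (c : Char) : Bool := !(c == ' ' || c == '\'' || c == '"')

def pvScanB (l : List Char) : List (List Char) :=
  match l with
  | [] => []
  | c :: rest =>
    if c = ' ' then pvScanB rest
    else if c = '\'' ∨ c = '"' then
      if _hr : rest.dropWhile (· ≠ c) = [] then [c :: rest.takeWhile (· ≠ c)]
      else (c :: rest.takeWhile (· ≠ c) ++ [c]) :: pvScanB (rest.dropWhile (· ≠ c)).tail
    else
      (c :: rest.takeWhile pvOther) :: pvScanB (rest.dropWhile pvOther)
termination_by l.length
decreasing_by
  · simp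
  · have h1 := List.length_dropWhile_le (fun x => x ≠ c) rest
    have h2 : (rest.dropWhile (· ≠ c)).length ≠ 0 := by
      simpa [List.length_eq_zero_iff] using _hr
    simp only [List.length_tail, List.length_cons]
    omega
  · have h1 := List.length_dropWhile_le pvOther rest
    simp; omega

def tokenize_print_args_py_alt (args_str : String) : List String :=
  (pvScanB args_str.toList).map String.mk

-- ===== PRECONDITION & SPEC =====
def Spec_tokenize_print_args_py (args_str : String) (out : List String) : Prop := out = tokenize_print_args_py_alt args_str
instance (args_str : String) (out : List String) : Decidable (Spec_tokenize_print_args_py args_str out) := by unfold Spec_tokenize_print_args_py; infer_instance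

-- ===== CLAIM (what is proved, stated in full; the proofs are below) =====
def Claim_equal_tokenize_print_args_py : Prop := ∀ (args_str : String), Dom_tokenize_print_args_py args_str → Spec_tokenize_print_args_py args_str (tokenize_print_args_py args_str)

-- ===== LEMMAS AND PROOFS =====

-- invariant tying A's loop state to the pending characters
def StateInv (s d : Bool) (cur : List Char) : Prop :=
  match s, d with
  | false, false => ∀ c ∈ cur, pvOther c = true
  | true, false => ∃ body, cur = '\'' :: body ∧ '\'' ∉ body
  | false, true => ∃ body, cur = '"' :: body ∧ '"' ∉ body
  | true, true => False

lemma takeWhile_append_all {p : Char → Bool} {xs : List Char} (ys : List Char)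
    (h : ∀ x ∈ xs, p x = true) : (xs ++ ys).takeWhile p = xs ++ ys.takeWhile p := by
  induction xs with
  | nil => simp
  | cons a as ih =>
    simp only [List.cons_append, List.takeWhile_cons]
    rw [h a (by simp), ih (fun x hx => h x (by simp [hx]))]
    simp

lemma dropWhile_append_all {p : Char → Bool} {xs : List Char} (ys : List Char)
    (h : ∀ x ∈ xs, p x = true) : (xs ++ ys).dropWhile p = ys.dropWhile p := by
  induction xs with
  | nil => simp
  | cons a as ih =>
    simp only [List.cons_append, List.dropWhile_cons]
    rw [h a (by simp), ih (fun x hx => h x (by simp [hx]))]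
    simp

lemma scanB_all_other (cur : List Char) (h : ∀ x ∈ cur, pvOther x = true) :
    pvScanB cur = if cur = [] then [] else [cur] := by
  cases cur with
  | nil => simp [pvScanB]
  | cons c cs =>
    have hc := h c (by simp)
    have h1 : ¬ c = ' ' := by simp [pvOther] at hc; tauto
    have h2' : ¬ (c = '\'' ∨ c = '"') := by simp [pvOther] at hc; tauto
    have h3 : cs.takeWhile pvOther = cs := by
      rw [List.takeWhile_eq_self_iff]; exact fun x hx => h x (by simp [hx])
    have h4 : cs.dropWhile pvOther = [] := by
      rw [List.dropWhile_eq_nil_iff]; exact fun x hx => h x (by simp [hx])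
    rw [pvScanB]
    simp only [h1, if_false, h2', h3, h4]
    simp [pvScanB]

lemma scanB_other_run (cur : List Char) (b : Char) (l : List Char)
    (hcur : ∀ x ∈ cur, pvOther x = true) (hne : cur ≠ []) (hb : pvOther b = false) :
    pvScanB (cur ++ b :: l) = cur :: pvScanB (b :: l) := by
  cases cur with
  | nil => exact absurd rfl hne
  | cons c cs =>
    have hc := hcur c (by simp)
    have h1 : ¬ c = ' ' := by simp [pvOther] at hc; tauto
    have h2 : ¬ (c = '\'' ∨ c = '"') := by simp [pvOther] at hc; tauto
    have hcs : ∀ x ∈ cs, pvOther x = true := fun x hx => hcur x (by simp [hx])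
    have h3 : (cs ++ b :: l).takeWhile pvOther = cs := by
      rw [takeWhile_append_all _ hcs, List.takeWhile_cons, hb]; simp
    have h4 : (cs ++ b :: l).dropWhile pvOther = b :: l := by
      rw [dropWhile_append_all _ hcs, List.dropWhile_cons, hb]; simp
    rw [List.cons_append, pvScanB]
    simp [h1, h2, h3, h4]

lemma scanB_quote_close (q : Char) (body l : List Char)
    (hq : ¬ q = ' ') (hq2 : q = '\'' ∨ q = '"') (hb : q ∉ body) :
    pvScanB (q :: (body ++ q :: l)) = (q :: (body ++ [q])) :: pvScanB l := by
  have h3 : (body ++ q :: l).takeWhile (· ≠ q) = body := by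
    rw [takeWhile_append_all (p := (· ≠ q)) _ (by intro x hx; simp; exact fun e => hb (e ▸ hx))]
    simp
  have h4 : (body ++ q :: l).dropWhile (· ≠ q) = q :: l := by
    rw [dropWhile_append_all (p := (· ≠ q)) _ (by intro x hx; simp; exact fun e => hb (e ▸ hx))]
    simp
  rw [pvScanB]
  simp only [hq, if_false, hq2, if_true, h3]
  rw [dif_neg (by simp [h4]), h4]
  simp

lemma scanB_quote_unterminated (q : Char) (body : List Char)
    (hq : ¬ q = ' ') (hq2 : q = '\'' ∨ q = '"') (hb : q ∉ body) :
    pvScanB (q :: body) = [q :: body] := by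
  have h3 : body.takeWhile (· ≠ q) = body := by
    rw [List.takeWhile_eq_self_iff]; intro x hx; simp; exact fun e => hb (e ▸ hx)
  have h4 : body.dropWhile (· ≠ q) = [] := by
    rw [List.dropWhile_eq_nil_iff]; intro x hx; simp; exact fun e => hb (e ▸ hx)
  rw [pvScanB]
  simp only [hq, if_false, hq2, if_true, h3]
  rw [dif_pos h4]

lemma inv_neutral (cur : List Char) (h : ∀ c ∈ cur, pvOther c = true) :
    StateInv false false cur := h

lemma inv_single (body : List Char) (hb : '\'' ∉ body) :
    StateInv true false ('\'' :: body) := ⟨body, rfl, hb⟩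

lemma inv_double (body : List Char) (hb : '"' ∉ body) :
    StateInv false true ('"' :: body) := ⟨body, rfl, hb⟩

lemma pvLoopA_eq (l : List Char) : ∀ (tokens : List (List Char)) (cur : List Char) (s d : Bool),
    StateInv s d cur → pvLoopA tokens cur s d l = tokens ++ pvScanB (cur ++ l) := by
  induction l with
  | nil =>
    intro tokens cur s d hinv
    cases s <;> cases d <;> simp [StateInv] at hinv
    · -- neutral
      rw [List.append_nil, scanB_all_other cur hinv, pvLoopA]
      by_cases h : cur = [] <;> simp [h]
    · -- double
      obtain ⟨body, rfl, hb⟩ := hinv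
      rw [List.append_nil, scanB_quote_unterminated _ _ (by decide) (by simp) hb, pvLoopA]
      simp
    · -- single
      obtain ⟨body, rfl, hb⟩ := hinv
      rw [List.append_nil, scanB_quote_unterminated _ _ (by decide) (by simp) hb, pvLoopA]
      simp
  | cons c rest ih =>
    intro tokens cur s d hinv
    cases s <;> cases d <;> simp [StateInv] at hinv
    · -- neutral state
      by_cases h1 : c = '\''
      · subst h1
        rw [pvLoopA, if_pos (by decide), if_neg (by decide)]
        rw [ih _ ['\''] true false (inv_single [] (by simp))]
        by_cases h : cur = []
        · subst h; simp
        · rw [if_neg h, scanB_other_run cur '\'' rest hinv h (by decide)]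
          simp
      · by_cases h2 : c = '"'
        · subst h2
          rw [pvLoopA, if_neg (by decide), if_pos (by decide), if_neg (by decide)]
          rw [ih _ ['"'] false true (inv_double [] (by simp))]
          by_cases h : cur = []
          · subst h; simp
          · rw [if_neg h, scanB_other_run cur '"' rest hinv h (by decide)]
            simp
        · by_cases h3 : c = ' '
          · subst h3
            rw [pvLoopA, if_neg (by decide), if_neg (by decide), if_pos (by decide)]
            rw [ih _ [] false false (inv_neutral [] (by simp))]
            have hskip : pvScanB (' ' :: rest) = pvScanB rest := by rw [pvScanB]; simp
            by_cases h : cur = []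
            · subst h; simp [hskip]
            · rw [if_neg h, scanB_other_run cur ' ' rest hinv h (by decide), hskip]
              simp
          · have hc : pvOther c = true := by simp [pvOther, h1, h2, h3]
            rw [pvLoopA, if_neg (by simp [h1]), if_neg (by simp [h2]), if_neg (by simp [h3])]
            rw [ih tokens (cur ++ [c]) false false (inv_neutral _ (by
              intro x hx
              rcases List.mem_append.1 hx with hx | hx
              · exact hinv x hx
              · simp at hx; subst hx; exact hc))]
            simp
    · -- double-quote state
      obtain ⟨body, rfl, hb⟩ := hinv
      by_cases h2 : c = '"'
      · subst h2
        rw [pvLoopA, if_neg (by decide), if_pos (by decide), if_pos rfl]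
        rw [ih _ [] false false (inv_neutral [] (by simp))]
        rw [show ('"' :: body) ++ '"' :: rest = '"' :: (body ++ '"' :: rest) from rfl]
        rw [scanB_quote_close '"' body rest (by decide) (by simp) hb]
        simp
      · rw [pvLoopA, if_neg (by simp), if_neg (by simp [h2]), if_neg (by simp)]
        have hrec := ih tokens ('"' :: (body ++ [c])) false true
          (inv_double (body ++ [c]) (by
            simp only [List.mem_append, List.mem_singleton]
            rintro (hx | rfl)
            · exact hb hx
            · exact h2 rfl))
        simpa using hrec
    · -- single-quote state
      obtain ⟨body, rfl, hb⟩ := hinv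
      by_cases h1 : c = '\''
      · subst h1
        rw [pvLoopA, if_pos (by decide), if_pos rfl]
        rw [ih _ [] false false (inv_neutral [] (by simp))]
        rw [show ('\'' :: body) ++ '\'' :: rest = '\'' :: (body ++ '\'' :: rest) from rfl]
        rw [scanB_quote_close '\'' body rest (by decide) (by simp) hb]
        simp
      · rw [pvLoopA, if_neg (by simp [h1]), if_neg (by simp), if_neg (by simp)]
        have hrec := ih tokens ('\'' :: (body ++ [c])) true false
          (inv_single (body ++ [c]) (by
            simp only [List.mem_append, List.mem_singleton]
            rintro (hx | rfl)
            · exact hb hx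
            · exact h1 rfl))
        simpa using hrec

-- ===== VERDICT (by name: the statement is the Claim_ definition above) =====
theorem tokenize_print_args_py_spec : Claim_equal_tokenize_print_args_py := by
  intro args_str _
  unfold Spec_tokenize_print_args_py tokenize_print_args_py tokenize_print_args_py_alt
  rw [pvLoopA_eq args_str.toList [] [] false false (inv_neutral [] (by simp))]
  simp
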